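-- pv_equiv track=rewrite | github.com/Rhul27/Python-Interview-Questions | question24.py | func
-- ===== SOURCE A (Python) =====
-- def func(n,s,m,t):
--     count=0
--     lst=[]
--     for i in m:
--         lst.append(i)
--     for i in range(n):
--         a=lst.pop(i)
--         for word in t:
--             if "".join(lst)==word:
--                 count+=1
--         lst.insert(i,a)
--     return count
-- ===== SOURCE B (Python) =====
-- def func(n, s, m, t):
--     cand = {}
--     for i in range(n):
--         w = "".join(m[:i] + m[i+1:])
--         cand[w] = cand.get(w, 0) + 1
--     tc = {}
--     for w in t:
--         tc[w] = tc.get(w, 0) + 1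
--     return sum(c * tc.get(w, 0) for w, c in cand.items())
-- ===== Notes on version B (the rewrite author's own statement) =====
-- stated objective: faster
-- what changed: A rescans all of t for every removal position i (and mutates a working copy with pop/insert); B builds a frequency table of the n candidate strings via slicing and a frequency table of t in one pass, then returns their dot product over the candidate table's keys.
import Mathlib
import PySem

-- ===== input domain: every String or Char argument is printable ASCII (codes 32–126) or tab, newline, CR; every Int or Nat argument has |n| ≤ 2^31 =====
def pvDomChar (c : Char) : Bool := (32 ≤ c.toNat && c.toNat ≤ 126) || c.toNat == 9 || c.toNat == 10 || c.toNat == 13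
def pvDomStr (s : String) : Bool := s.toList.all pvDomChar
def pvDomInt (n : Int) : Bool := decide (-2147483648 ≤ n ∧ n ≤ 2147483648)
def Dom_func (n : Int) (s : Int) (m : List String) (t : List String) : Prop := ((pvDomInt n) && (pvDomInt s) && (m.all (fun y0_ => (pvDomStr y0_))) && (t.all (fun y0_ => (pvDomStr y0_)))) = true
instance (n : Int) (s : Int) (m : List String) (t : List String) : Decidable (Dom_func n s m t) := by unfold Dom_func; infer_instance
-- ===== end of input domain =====

-- B replaces A's per-position rescan of t by two frequency tables (candidate strings and t) combined as a dot product; objective: faster (one pass over t instead of one per position).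

-- ===== PORT A =====
-- the 'for i in range(n)' loop: state = (count, lst); pop returns none (IndexError) when i is out of range
def funcLoop (t : List String) : List Int → Int → List String → Option Int
  | [], count, _lst => some count
  | i :: is, count, lst =>
    match PySem.List.pop? lst i with
    | none => none
    | some (a, rest) =>
      funcLoop t is
        (t.foldl (fun c word => if PySem.Str.join "" rest == word then c + 1 else c) count)
        (PySem.List.insert rest i a)

def func (n : Int) (s : Int) (m : List String) (t : List String) : Int :=
  let lst := m.foldl (fun acc i => acc ++ [i]) ([] : List String)
  match funcLoop t (PySem.List.pyRange 0 n 1) 0 lst with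
  | some c => c
  | none => 0    -- IndexError in Python; excluded by Pre_func

-- ===== PORT B =====
def func_alt (n : Int) (s : Int) (m : List String) (t : List String) : Int :=
  let cand := (PySem.List.pyRange 0 n 1).foldl
    (fun d i =>
      let w := PySem.Str.join ""
        (PySem.List.slice m none (some i) ++ PySem.List.slice m (some (i + 1)) none)
      d.insert w (d.getD w 0 + 1)) PySem.Dict.empty
  let tc := t.foldl (fun d w => d.insert w (d.getD w 0 + 1)) PySem.Dict.empty
  (cand.items.map (fun p => p.2 * tc.getD p.1 0)).sum

-- ===== PRECONDITION & SPEC =====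
-- Pre_func excludes exactly the inputs where A's lst.pop(i) raises IndexError (some i in range(n) reaches len(m)).
def Pre_func (n : Int) (s : Int) (m : List String) (t : List String) : Prop := n ≤ (m.length : Int)
instance (n : Int) (s : Int) (m : List String) (t : List String) : Decidable (Pre_func n s m t) := by unfold Pre_func; infer_instance
def pvWitness_func : Int × Int × List String × List String := (1, 0, ["a"], ["a"])

def Spec_func (n : Int) (s : Int) (m : List String) (t : List String) (out : Int) : Prop := out = func_alt n s m t
instance (n : Int) (s : Int) (m : List String) (t : List String) (out : Int) : Decidable (Spec_func n s m t out) := by unfold Spec_func; infer_instance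

-- ===== CLAIM (what is proved, stated in full; the proofs are below) =====
def Claim_equal_func : Prop := ∀ (n : Int) (s : Int) (m : List String) (t : List String), Dom_func n s m t → Pre_func n s m t → Spec_func n s m t (func n s m t)

-- ===== LEMMAS AND PROOFS =====

-- restoring the popped element: A's lst.insert(i, a) undoes lst.pop(i)
lemma insert_eraseIdx_restore (m : List String) (k : Nat) (hk : k < m.length) :
    PySem.List.insert (m.eraseIdx k) (k : Int) m[k] = m := by
  have hlen : (List.take k m).length = k := by simp [Nat.le_of_lt hk]
  rw [PySem.List.insert_natCast _ _ _ (by simp [List.length_eraseIdx, hk]; omega)]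
  rw [List.eraseIdx_eq_take_drop_succ]
  rw [List.take_left' hlen, List.drop_left' hlen]
  rw [List.getElem_cons_drop, List.take_append_drop]

-- the inner 'for word in t' loop counts the words equal to the joined candidate
lemma inner_count (t : List String) (v : String) (c : Int) :
    t.foldl (fun c word => if v == word then c + 1 else c) c = c + (t.count v : Int) := by
  rw [← PySem.List.foldl_beq_add_one (l := t) (v := v) (a := c)]
  apply PySem.List.foldl_congr_mem
  intro acc x _
  rw [BEq.comm]

-- A's main loop characterised under the precondition
lemma loop_eq (t m : List String) (a n : Int) (ha : 0 ≤ a) (hn : n ≤ (m.length : Int)) (c : Int) :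
    funcLoop t (PySem.List.pyRange a n 1) c m =
      some (c + ((PySem.List.pyRange a n 1).map
        (fun i => (t.count (PySem.Str.join "" (m.eraseIdx i.toNat)) : Int))).sum) := by
  by_cases hab : n ≤ a
  · rw [PySem.List.pyRange_one_eq_nil hab]
    simp [funcLoop]
  · have hab' : a < n := by omega
    have hk : a.toNat < m.length := by omega
    rw [PySem.List.pyRange_one_cons hab']
    simp only [funcLoop]
    have hpop : PySem.List.pop? m a = some (m[a.toNat], m.eraseIdx a.toNat) := by
      have := PySem.List.pop?_natCast (xs := m) (n := a.toNat) hk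
      rwa [Int.toNat_of_nonneg ha] at this
    rw [hpop]
    simp only
    have hres := insert_eraseIdx_restore m a.toNat hk
    rw [Int.toNat_of_nonneg ha] at hres
    rw [hres, inner_count]
    rw [loop_eq t m (a + 1) n (by omega) hn]
    simp only [List.map_cons, List.sum_cons]
    ring_nf
termination_by ((n - a).toNat)
decreasing_by omega

lemma sum_indicator (L : List String) (F : String → Int) (x : String)
    (hnd : L.Nodup) (hx : x ∈ L) :
    (L.map (fun w => if w = x then F w else 0)).sum = F x := by
  induction L with
  | nil => cases hx
  | cons y L ih =>
    simp only [List.map_cons, List.sum_cons]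
    rcases List.mem_cons.mp hx with h | h
    · subst h
      have h0 : ∀ w ∈ L, (if w = x then F w else 0) = 0 := by
        intro w hw
        have : w ≠ x := fun hw' => (List.nodup_cons.mp hnd).1 (hw' ▸ hw)
        simp [this]
      rw [List.map_congr_left h0]
      simp
    · have hne : y ≠ x := fun h' => (List.nodup_cons.mp hnd).1 (h' ▸ h)
      rw [if_neg hne, ih (List.nodup_cons.mp hnd).2 h]
      ring

-- the dot product of a counter (over any nodup key list covering C) with F is the plain sum of F over C
lemma sum_dedup_count_mul (C : List String) (F : String → Int) (L : List String)
    (hnd : L.Nodup) (hsub : ∀ x ∈ C, x ∈ L) :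
    (L.map (fun w => (C.count w : Int) * F w)).sum = (C.map F).sum := by
  induction C with
  | nil => simp
  | cons x C ih =>
    have hx : x ∈ L := hsub x List.mem_cons_self
    have hpt : ∀ w ∈ L, ((List.count w (x :: C) : Int) * F w) =
        (C.count w : Int) * F w + (if w = x then F w else 0) := by
      intro w hw
      by_cases h : w = x
      · subst h; simp; ring
      · simp [List.count_cons, h]
        exact Or.inl fun hh => h hh.symm
    calc (L.map (fun w => ((x :: C).count w : Int) * F w)).sum
        = (L.map (fun w => (C.count w : Int) * F w + (if w = x then F w else 0))).sum := by
          rw [List.map_congr_left hpt]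
      _ = (L.map (fun w => (C.count w : Int) * F w)).sum
            + (L.map (fun w => if w = x then F w else 0)).sum := by
          rw [← List.sum_map_add]
      _ = (C.map F).sum + F x := by
          rw [ih (fun y hy => hsub y (List.mem_cons_of_mem _ hy)),
              sum_indicator L F x hnd hx]
      _ = ((x :: C).map F).sum := by simp; ring

-- B rewritten as a plain sum of t-counts over the candidate multiset
lemma alt_eq (n : Int) (s : Int) (m t : List String) :
    func_alt n s m t =
      (((PySem.List.pyRange 0 n 1).map
        (fun i => PySem.Str.join ""
          (PySem.List.slice m none (some i) ++ PySem.List.slice m (some (i + 1)) none))).map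
        (fun w => (t.count w : Int))).sum := by
  unfold func_alt
  simp only
  set f := fun i : Int => PySem.Str.join ""
    (PySem.List.slice m none (some i) ++ PySem.List.slice m (some (i + 1)) none) with hf
  have hcand : (PySem.List.pyRange 0 n 1).foldl
      (fun d i => d.insert (f i) (d.getD (f i) 0 + 1)) PySem.Dict.empty
      = PySem.Dict.counter ((PySem.List.pyRange 0 n 1).map f) := by
    rw [← PySem.Dict.foldl_insert_getD_add_one_eq_counter, List.foldl_map]
  rw [hcand, PySem.Dict.foldl_insert_getD_add_one_eq_counter (xs := t)]
  rw [PySem.Dict.items_counter]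
  rw [List.map_map]
  set C := (PySem.List.pyRange 0 n 1).map f with hC
  have : ((fun p : String × Int => p.2 * (PySem.Dict.counter t).getD p.1 0) ∘
      fun k => (k, (C.count k : Int))) = fun w => (C.count w : Int) * (t.count w : Int) := by
    funext w
    simp [PySem.Dict.getD_counter]
  rw [this]
  exact sum_dedup_count_mul C (fun w => (t.count w : Int)) (PySem.Set.ofList C)
    (PySem.Set.nodup_ofList C) (fun x hx => (PySem.Set.mem_ofList C x).mpr hx)

-- ===== VERDICT (by name: the statement is the Claim_ definition above) =====
theorem func_spec : Claim_equal_func := by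
  intro n s m t _hdom hpre
  unfold Spec_func func
  simp only [PySem.List.foldl_append_singleton_eq_self, List.nil_append]
  rw [loop_eq t m 0 n le_rfl hpre 0, alt_eq, List.map_map]
  simp only [zero_add]
  apply congrArg List.sum
  apply List.map_congr_left
  intro i hi
  have h0 : 0 ≤ i := ((PySem.List.mem_pyRange_one).mp hi).1
  have h1 : ((i + 1).toNat) = i.toNat + 1 := by omega
  have hsl : PySem.List.slice m none (some i) ++ PySem.List.slice m (some (i + 1)) none
      = m.eraseIdx i.toNat := by
    rw [PySem.List.slice_to m h0, PySem.List.slice_from m (by omega : (0:Int) ≤ i + 1), h1,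
      ← List.eraseIdx_eq_take_drop_succ]
  simp only [Function.comp, hsl]
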